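-- pv_equiv track=rewrite | github.com/SH801/opensite | opensite/model/tree/opensite.py | choose_priority_resource
-- ===== SOURCE A (Python) =====
-- def choose_priority_resource(resources, priority_ordered_formats):
--     """
--     Choose the single best dataset from a list based on FORMATS priority.
--     """
--     if not resources:
--         return None
--
--     # We want to find the dataset whose resource format has the lowest index in self.FORMATS
--     best_resource = resources[0] # Default to first if no priority match found
--     best_index = len(priority_ordered_formats)
--
--     for resource in resources:
--         format = resource.get('format')
--         if format in priority_ordered_formats:
--             current_index = priority_ordered_formats.index(format)
--             if current_index < best_index:
--                 best_index = current_index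
--                 best_resource = resource
--
--                 # Optimization: If we found the #1 priority (GPKG), we can stop looking
--                 if best_index == 0:
--                     return best_resource
--
--     return best_resource
-- ===== SOURCE B (Python) =====
-- def choose_priority_resource(resources, priority_ordered_formats):
--     """
--     Choose the single best dataset from a list based on FORMATS priority.
--     """
--     if not resources:
--         return None
--     # Walk the priority list in order; the first format that any resource
--     # carries wins, and the first such resource is returned.
--     for fmt in priority_ordered_formats:
--         for resource in resources:
--             if resource.get('format') == fmt:
--                 return resource
--     # No resource matches any prioritised format.
--     return resources[0]
-- ===== Notes on version B (the rewrite author's own statement) =====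
-- stated objective: alternative
-- what changed: Instead of scanning resources while maintaining a running best index looked up with `in`/`.index` per resource, B iterates the priority list in order and returns the first resource matching the current format, falling back to resources[0].
import Mathlib
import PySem

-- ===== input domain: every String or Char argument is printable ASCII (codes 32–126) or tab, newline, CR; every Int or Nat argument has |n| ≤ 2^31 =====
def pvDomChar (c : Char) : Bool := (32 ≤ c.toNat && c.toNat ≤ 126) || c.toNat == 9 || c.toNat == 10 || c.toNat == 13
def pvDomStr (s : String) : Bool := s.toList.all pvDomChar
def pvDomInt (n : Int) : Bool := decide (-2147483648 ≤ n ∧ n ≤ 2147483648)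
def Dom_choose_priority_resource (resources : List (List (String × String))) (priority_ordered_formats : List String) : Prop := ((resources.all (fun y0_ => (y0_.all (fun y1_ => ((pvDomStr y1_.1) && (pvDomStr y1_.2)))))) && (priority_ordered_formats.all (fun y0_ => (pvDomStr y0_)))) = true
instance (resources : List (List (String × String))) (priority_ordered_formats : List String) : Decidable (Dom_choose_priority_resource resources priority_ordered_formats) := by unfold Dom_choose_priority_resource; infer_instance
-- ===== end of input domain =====

-- B walks the priority list in order and returns the first resource matching the current format
-- (fallback resources[0]) instead of A's running best-index scan over resources: alternative decomposition, same result.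


-- shared primitive: Python dict.get('format') on an association list (first match), used by both ports
def pvGetFormat (r : List (String × String)) : Option String :=
  (r.find? (fun kv => kv.1 == "format")).map (fun kv => kv.2)

-- ===== PORT A =====
-- A's loop over resources, carrying (best_resource, best_index); early return when best_index == 0
def chooseA_loop (pofs : List String) :
    List (List (String × String)) → List (String × String) → Nat → List (String × String)
  | [], best, _ => best
  | r :: rest, best, bidx =>
    match pvGetFormat r with
    | some f =>
      if pofs.contains f then
        match PySem.List.index? pofs f with
        | some ci =>
          if ci < bidx then
            if ci = 0 then r else chooseA_loop pofs rest r ci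
          else chooseA_loop pofs rest best bidx
        | none => chooseA_loop pofs rest best bidx   -- unreachable: contains f holds
      else chooseA_loop pofs rest best bidx
    | none => chooseA_loop pofs rest best bidx       -- `None in list_of_str` is False

def choose_priority_resource (resources : List (List (String × String))) (priority_ordered_formats : List String) : Option (List (String × String)) :=
  match resources with
  | [] => none
  | r0 :: _ => some (chooseA_loop priority_ordered_formats resources r0 priority_ordered_formats.length)

-- ===== PORT B =====
-- inner scan: first resource whose format equals fmt
def chooseB_find (resources : List (List (String × String))) (fmt : String) : Option (List (String × String)) :=
  match resources with
  | [] => none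
  | r :: rest => if pvGetFormat r == some fmt then some r else chooseB_find rest fmt

-- outer loop over the priority list
def chooseB_outer (resources : List (List (String × String))) :
    List String → Option (List (String × String))
  | [] => none
  | f :: fs =>
    match chooseB_find resources f with
    | some r => some r
    | none => chooseB_outer resources fs

def choose_priority_resource_alt (resources : List (List (String × String))) (priority_ordered_formats : List String) : Option (List (String × String)) :=
  match resources with
  | [] => none
  | r0 :: _ =>
    match chooseB_outer resources priority_ordered_formats with
    | some r => some r
    | none => some r0

-- ===== PRECONDITION & SPEC =====
def Spec_choose_priority_resource (resources : List (List (String × String))) (priority_ordered_formats : List String) (out : Option (List (String × String))) : Prop := out = choose_priority_resource_alt resources priority_ordered_formats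
instance (resources : List (List (String × String))) (priority_ordered_formats : List String) (out : Option (List (String × String))) : Decidable (Spec_choose_priority_resource resources priority_ordered_formats out) := by unfold Spec_choose_priority_resource; infer_instance

-- ===== CLAIM (what is proved, stated in full; the proofs are below) =====
def Claim_equal_choose_priority_resource : Prop := ∀ (resources : List (List (String × String))) (priority_ordered_formats : List String), Dom_choose_priority_resource resources priority_ordered_formats → Spec_choose_priority_resource resources priority_ordered_formats (choose_priority_resource resources priority_ordered_formats)

-- ===== LEMMAS AND PROOFS =====

-- priority rank of a resource: index of its format in pofs, or pofs.length when absent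
def pvKey (pofs : List String) (r : List (String × String)) : Nat :=
  match pvGetFormat r with
  | none => pofs.length
  | some f => (PySem.List.index? pofs f).getD pofs.length

-- minimum rank over a list of resources (pofs.length if none beats it)
def pvMinKey (pofs : List String) (rs : List (List (String × String))) : Nat :=
  rs.foldr (fun r acc => min (pvKey pofs r) acc) pofs.length

theorem pvKey_none (pofs : List String) (x : List (String × String))
    (h : pvGetFormat x = none) : pvKey pofs x = pofs.length := by
  unfold pvKey; rw [h]

theorem pvKey_some (pofs : List String) (x : List (String × String)) (f : String)
    (h : pvGetFormat x = some f) :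
    pvKey pofs x = (PySem.List.index? pofs f).getD pofs.length := by
  unfold pvKey; rw [h]

theorem pvMinKey_cons (pofs : List String) (r : List (String × String)) (rs : List (List (String × String))) :
    pvMinKey pofs (r :: rs) = min (pvKey pofs r) (pvMinKey pofs rs) := rfl

theorem pvMinKey_le_length (pofs : List String) (rs : List (List (String × String))) :
    pvMinKey pofs rs ≤ pofs.length := by
  induction rs with
  | nil => simp [pvMinKey]
  | cons r rest ih => rw [pvMinKey_cons]; omega

theorem pvMinKey_le_of_mem (pofs : List String) {rs : List (List (String × String))}
    {r : List (String × String)} (h : r ∈ rs) : pvMinKey pofs rs ≤ pvKey pofs r := by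
  induction rs with
  | nil => cases h
  | cons x rest ih =>
    rw [pvMinKey_cons]
    rcases List.mem_cons.mp h with h | h
    · subst h; omega
    · have := ih h; omega

theorem le_pvMinKey (pofs : List String) {rs : List (List (String × String))} {n : Nat}
    (h : ∀ r ∈ rs, n ≤ pvKey pofs r) (hL : n ≤ pofs.length) : n ≤ pvMinKey pofs rs := by
  induction rs with
  | nil => simpa [pvMinKey]
  | cons x rest ih =>
    rw [pvMinKey_cons]
    have h1 := h x (List.mem_cons_self)
    have h2 := ih (fun r hr => h r (List.mem_cons_of_mem _ hr))
    omega

theorem pvFind?_congr {α : Type} (p q : α → Bool) (l : List α)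
    (h : ∀ x ∈ l, p x = q x) : l.find? p = l.find? q := by
  induction l with
  | nil => rfl
  | cons x rest ih =>
    have hx := h x (List.mem_cons_self)
    rw [List.find?_cons, List.find?_cons, hx]
    cases q x
    · exact ih (fun y hy => h y (List.mem_cons_of_mem _ hy))
    · rfl

-- the minimum (when below pofs.length) is achieved by some element, so find? succeeds
theorem pvMinKey_achieved (pofs : List String) (rs : List (List (String × String)))
    (h : pvMinKey pofs rs < pofs.length) :
    (rs.find? (fun r => pvKey pofs r == pvMinKey pofs rs)).isSome := by
  rw [List.find?_isSome]
  induction rs with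
  | nil => simp [pvMinKey] at h
  | cons x rest ih =>
    rw [pvMinKey_cons] at h ⊢
    by_cases hx : pvKey pofs x ≤ pvMinKey pofs rest
    · exact ⟨x, List.mem_cons_self, by simp; omega⟩
    · have hm : min (pvKey pofs x) (pvMinKey pofs rest) = pvMinKey pofs rest := by omega
      rw [hm] at h ⊢
      obtain ⟨r, hr, hpr⟩ := ih h
      exact ⟨r, List.mem_cons_of_mem _ hr, hpr⟩

-- first-occurrence characterisation: if pofs[j] = f then index? returns some j' ≤ j
theorem pvIndex?_le (pofs : List String) (f : String) (j : Nat) (hj : j < pofs.length)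
    (hpj : pofs[j] = f) : ∃ j' ≤ j, PySem.List.index? pofs f = some j' := by
  have hmem : f ∈ pofs := hpj ▸ List.getElem_mem hj
  have hs : (PySem.List.index? pofs f).isSome :=
    (PySem.List.index?_isSome_iff pofs f).mpr hmem
  obtain ⟨j', hj'⟩ := Option.isSome_iff_exists.mp hs
  obtain ⟨hk, _, hfirst⟩ := PySem.List.getElem_of_index?_eq_some hj'
  refine ⟨j', ?_, hj'⟩
  by_contra hlt
  exact hfirst j (by omega) hpj

-- at position j of pofs (pofs[j] = f), for x with j ≤ pvKey x: pvKey x = j ↔ format x = f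
theorem pvKey_eq_iff (pofs : List String) (f : String) (j : Nat) (hj : j < pofs.length)
    (hpj : pofs[j] = f) (x : List (String × String)) (hx : j ≤ pvKey pofs x) :
    (pvKey pofs x = j ↔ pvGetFormat x = some f) := by
  constructor
  · intro hk
    cases hfmt : pvGetFormat x with
    | none => rw [pvKey_none pofs x hfmt] at hk; omega
    | some g =>
      rw [pvKey_some pofs x g hfmt] at hk
      cases hidx : PySem.List.index? pofs g with
      | none => rw [hidx] at hk; simp at hk; omega
      | some k =>
        rw [hidx] at hk; simp at hk
        subst hk
        obtain ⟨hkl, hget, _⟩ := PySem.List.getElem_of_index?_eq_some hidx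
        rw [← hget, hpj]
  · intro hfmt
    obtain ⟨j', hle, hidx⟩ := pvIndex?_le pofs f j hj hpj
    have : pvKey pofs x = j' := by rw [pvKey_some pofs x f hfmt, hidx]; rfl
    omega

-- ===== A-side: the loop returns the first resource achieving the minimum key below bidx =====
theorem chooseA_loop_spec (pofs : List String) (rs : List (List (String × String)))
    (best : List (String × String)) (bidx : Nat) (hb : bidx ≤ pofs.length) :
    chooseA_loop pofs rs best bidx =
      if pvMinKey pofs rs < bidx then
        (rs.find? (fun r => pvKey pofs r == pvMinKey pofs rs)).getD best
      else best := by
  induction rs generalizing best bidx with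
  | nil => simp [chooseA_loop, pvMinKey]
  | cons r rest ih =>
    have hrest_le := pvMinKey_le_length pofs rest
    rw [pvMinKey_cons]
    -- a common continuation: key r plays no role (key r = pofs.length or key r ≥ bidx)
    cases hfmt : pvGetFormat r with
    | none =>
      have hk : pvKey pofs r = pofs.length := pvKey_none pofs r hfmt
      simp only [chooseA_loop, hfmt]
      rw [ih best bidx hb]
      by_cases hcond : pvMinKey pofs rest < bidx
      · have hmin : min (pvKey pofs r) (pvMinKey pofs rest) = pvMinKey pofs rest := by omega
        rw [hmin, if_pos hcond, if_pos hcond, List.find?_cons]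
        have : (pvKey pofs r == pvMinKey pofs rest) = false := by simp; omega
        rw [this]
      · have hmin : ¬ min (pvKey pofs r) (pvMinKey pofs rest) < bidx := by omega
        rw [if_neg hcond, if_neg hmin]
    | some f =>
      by_cases hc : pofs.contains f
      · have hmem : f ∈ pofs := by simpa using hc
        have hs : (PySem.List.index? pofs f).isSome :=
          (PySem.List.index?_isSome_iff pofs f).mpr hmem
        obtain ⟨ci, hci⟩ := Option.isSome_iff_exists.mp hs
        have hk : pvKey pofs r = ci := by rw [pvKey_some pofs r f hfmt, hci]; rfl
        simp only [chooseA_loop, hfmt, hc, if_true, hci]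
        by_cases hlt : ci < bidx
        · rw [if_pos hlt]
          by_cases h0 : ci = 0
          · -- early return: the head achieves key 0, the global minimum
            subst h0
            have hmin : min (pvKey pofs r) (pvMinKey pofs rest) = 0 := by omega
            rw [if_pos rfl]  -- port branch 'if ci = 0'
            rw [hmin, if_pos (by omega), List.find?_cons]
            have : (pvKey pofs r == 0) = true := by simp [hk]
            rw [this]; rfl
          · rw [if_neg h0, ih r ci (by omega)]
            by_cases hm : pvMinKey pofs rest < ci
            · have hmin : min (pvKey pofs r) (pvMinKey pofs rest) = pvMinKey pofs rest := by omega
              rw [if_pos hm, hmin, if_pos (by omega), List.find?_cons]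
              have hne : (pvKey pofs r == pvMinKey pofs rest) = false := by simp; omega
              rw [hne]
              -- both sides are find? rest … with different defaults; find? succeeds
              have hsome := pvMinKey_achieved pofs rest (by omega)
              obtain ⟨v, hv⟩ := Option.isSome_iff_exists.mp hsome
              rw [hv]; rfl
            · have hmin : min (pvKey pofs r) (pvMinKey pofs rest) = pvKey pofs r := by omega
              rw [if_neg hm, hmin, if_pos (by omega), List.find?_cons]
              have : (pvKey pofs r == pvKey pofs r) = true := by simp
              rw [this]; rfl
        · rw [if_neg hlt, ih best bidx hb]
          by_cases hm : pvMinKey pofs rest < bidx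
          · have hmin : min (pvKey pofs r) (pvMinKey pofs rest) = pvMinKey pofs rest := by omega
            rw [if_pos hm, hmin, if_pos hm, List.find?_cons]
            have : (pvKey pofs r == pvMinKey pofs rest) = false := by simp; omega
            rw [this]
          · have hmin : ¬ min (pvKey pofs r) (pvMinKey pofs rest) < bidx := by omega
            rw [if_neg hm, if_neg hmin]
      · -- format not in pofs: key r = pofs.length, same as the `none` case
        have hnmem : f ∉ pofs := by simpa using hc
        have hidx : PySem.List.index? pofs f = none :=
          (PySem.List.index?_eq_none_iff pofs f).mpr hnmem
        have hk : pvKey pofs r = pofs.length := by rw [pvKey_some pofs r f hfmt, hidx]; rfl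
        simp only [chooseA_loop, hfmt, hc, if_false, Bool.false_eq_true]
        rw [ih best bidx hb]
        by_cases hcond : pvMinKey pofs rest < bidx
        · have hmin : min (pvKey pofs r) (pvMinKey pofs rest) = pvMinKey pofs rest := by omega
          rw [hmin, if_pos hcond, if_pos hcond, List.find?_cons]
          have : (pvKey pofs r == pvMinKey pofs rest) = false := by simp; omega
          rw [this]
        · have hmin : ¬ min (pvKey pofs r) (pvMinKey pofs rest) < bidx := by omega
          rw [if_neg hcond, if_neg hmin]

-- ===== B-side =====
theorem chooseB_find_eq_find? (rs : List (List (String × String))) (f : String) :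
    chooseB_find rs f = rs.find? (fun r => pvGetFormat r == some f) := by
  induction rs with
  | nil => rfl
  | cons r rest ih =>
    cases h : (pvGetFormat r == some f)
    · rw [chooseB_find, List.find?_cons, h]; simpa using ih
    · rw [chooseB_find, List.find?_cons, h]; rfl

theorem chooseB_outer_spec (pofs : List String) (rs : List (List (String × String))) :
    ∀ fs pre, pofs = pre ++ fs → (∀ r ∈ rs, pre.length ≤ pvKey pofs r) →
    chooseB_outer rs fs =
      if pvMinKey pofs rs < pofs.length then
        rs.find? (fun r => pvKey pofs r == pvMinKey pofs rs)
      else none := by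
  intro fs
  induction fs with
  | nil =>
    intro pre hsplit hge
    have hL : pre.length = pofs.length := by rw [hsplit]; simp
    have h1 : pofs.length ≤ pvMinKey pofs rs :=
      le_pvMinKey pofs (fun r hr => hL ▸ hge r hr) le_rfl
    rw [chooseB_outer, if_neg (by omega)]
  | cons f fs' ih =>
    intro pre hsplit hge
    have hjlt : pre.length < pofs.length := by rw [hsplit]; simp
    have hpj : pofs[pre.length]'hjlt = f := by
      subst hsplit; simp [List.getElem_append_right]
    have hiff := fun x hx => pvKey_eq_iff pofs f pre.length hjlt hpj x (hge x hx)
    rw [chooseB_outer, chooseB_find_eq_find?]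
    cases hfind : rs.find? (fun r => pvGetFormat r == some f) with
    | some r =>
      have hr := List.mem_of_find?_eq_some hfind
      have hpr : pvGetFormat r = some f := by
        have := List.find?_some hfind; simpa using this
      have hkr : pvKey pofs r = pre.length := (hiff r hr).mpr hpr
      have hmin : pvMinKey pofs rs = pre.length := by
        have h1 : pvMinKey pofs rs ≤ pre.length := hkr ▸ pvMinKey_le_of_mem pofs hr
        have h2 : pre.length ≤ pvMinKey pofs rs :=
          le_pvMinKey pofs hge (by omega)
        omega
      rw [if_pos (by omega)]
      rw [pvFind?_congr _ (fun r => pvGetFormat r == some f) rs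
        (fun x hx => by
          have := hiff x hx
          rw [hmin]
          cases h1 : (pvKey pofs x == pre.length) <;> cases h2 : (pvGetFormat x == some f) <;>
            simp_all)]
      rw [hfind]
    | none =>
      have hnone : ∀ x ∈ rs, pvGetFormat x ≠ some f := by
        intro x hx hcontra
        have := List.find?_eq_none.mp hfind x hx
        simp [hcontra] at this
      have hge' : ∀ x ∈ rs, (pre ++ [f]).length ≤ pvKey pofs x := by
        intro x hx
        have h1 := hge x hx
        have h2 : pvKey pofs x ≠ pre.length := fun hk => hnone x hx ((hiff x hx).mp hk)
        simp; omega
      exact ih (pre ++ [f]) (by simpa using hsplit) hge'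

-- ===== VERDICT (by name: the statement is the Claim_ definition above) =====
theorem choose_priority_resource_spec : Claim_equal_choose_priority_resource := by
  intro resources pofs _
  unfold Spec_choose_priority_resource
  cases resources with
  | nil => rfl
  | cons r0 rest =>
    simp only [choose_priority_resource, choose_priority_resource_alt]
    rw [chooseA_loop_spec pofs (r0 :: rest) r0 pofs.length le_rfl,
      chooseB_outer_spec pofs (r0 :: rest) pofs [] rfl (by simp)]
    by_cases h : pvMinKey pofs (r0 :: rest) < pofs.length
    · rw [if_pos h, if_pos h]
      obtain ⟨v, hv⟩ := Option.isSome_iff_exists.mp (pvMinKey_achieved pofs (r0 :: rest) h)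
      rw [hv]; rfl
    · rw [if_neg h, if_neg h]
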